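-- pv_equiv track=rewrite | github.com/EmmaBin/DSA | second_great_low.py | SecondGreatLow
-- ===== SOURCE A (Python) =====
-- def SecondGreatLow(arr):
--   if len(arr) ==2:
--     maxi = max(arr)
--     mini = min(arr)
--     return str(maxi)+' '+str(mini)
--
--   max_num = max(arr)
--   min_num = min(arr)
--   new_arr=[i for i in arr if i !=max_num and i !=min_num]
--   return str(min(new_arr))+' '+str(max(new_arr))
-- ===== SOURCE B (Python) =====
-- def SecondGreatLow(arr):
--     if len(arr) == 2:
--         return str(max(arr)) + ' ' + str(min(arr))
--     u = sorted(set(arr))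
--     if len(u) < 3:
--         raise ValueError("need at least three distinct values")
--     return str(u[1]) + ' ' + str(u[-2])
-- ===== Notes on version B (the rewrite author's own statement) =====
-- stated objective: simpler
-- what changed: Replaces the three max/min scans plus a filter comprehension with one sort of the distinct values and constant-index lookups u[1], u[-2].
-- outside the precondition, e.g. on SecondGreatLow([1]): A raises ValueError, B raises ValueError; on SecondGreatLow([-2]): A raises ValueError, B raises ValueError; on SecondGreatLow([]): A raises ValueError, B raises ValueError
import Mathlib
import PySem

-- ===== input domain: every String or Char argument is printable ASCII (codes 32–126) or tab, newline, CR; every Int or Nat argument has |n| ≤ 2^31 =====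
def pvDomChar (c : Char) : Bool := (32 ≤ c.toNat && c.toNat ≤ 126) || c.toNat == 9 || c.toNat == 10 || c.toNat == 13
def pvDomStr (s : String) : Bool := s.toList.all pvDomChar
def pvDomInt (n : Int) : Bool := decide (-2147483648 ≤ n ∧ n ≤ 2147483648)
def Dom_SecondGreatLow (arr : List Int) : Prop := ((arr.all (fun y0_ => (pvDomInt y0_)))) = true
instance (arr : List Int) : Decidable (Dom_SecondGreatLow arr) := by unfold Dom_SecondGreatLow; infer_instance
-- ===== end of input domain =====

-- B replaces A's three max/min scans plus a filter comprehension by one sort of the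
-- distinct values and constant-index lookups u[1], u[-2] (objective: simpler).

-- ===== PORT A =====
-- literal port of A: len==2 branch, else filter out max and min, return min/max of the rest
def SecondGreatLow (arr : List Int) : String :=
  if arr.length = 2 then
    match PySem.List.max? arr (fun x => x), PySem.List.min? arr (fun x => x) with
    | some maxi, some mini => PySem.Int.toStr maxi ++ " " ++ PySem.Int.toStr mini
    | _, _ => ""   -- max()/min() of empty: ValueError, outside Pre_
  else
    match PySem.List.max? arr (fun x => x), PySem.List.min? arr (fun x => x) with
    | some max_num, some min_num =>
      let new_arr := arr.filter (fun i => i != max_num && i != min_num)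
      match PySem.List.min? new_arr (fun x => x), PySem.List.max? new_arr (fun x => x) with
      | some a, some b => PySem.Int.toStr a ++ " " ++ PySem.Int.toStr b
      | _, _ => ""   -- min()/max() of empty filter result: ValueError, outside Pre_
    | _, _ => ""     -- max()/min() of empty arr: ValueError, outside Pre_

-- ===== PORT B =====
-- "str(a) + ' ' + str(b)" for two Python values that are present on every admitted input
def pvFmt2 (a b : Option Int) : String :=
  match a with
  | none => ""
  | some x =>
    match b with
    | none => ""
    | some y => PySem.Int.toStr x ++ " " ++ PySem.Int.toStr y

def SecondGreatLow_alt (arr : List Int) : String :=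
  if arr.length = 2 then
    pvFmt2 (PySem.List.max? arr (fun x => x)) (PySem.List.min? arr (fun x => x))
  else
    let u := PySem.List.sorted (PySem.Set.ofList arr) (fun x => x)
    if u.length < 3 then ""   -- raise ValueError, outside Pre_
    else pvFmt2 (PySem.List.pyGet? u 1) (PySem.List.pyGet? u (-2))

-- ===== PRECONDITION & SPEC =====
-- Pre_ excludes exactly the inputs on which A raises ValueError (empty/singleton input, or
-- fewer than three distinct values with len != 2); B raises ValueError on the same inputs.
def Pre_SecondGreatLow (arr : List Int) : Prop :=
  arr.length = 2 ∨ 3 ≤ (PySem.List.dedup arr).length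
instance (arr : List Int) : Decidable (Pre_SecondGreatLow arr) := by unfold Pre_SecondGreatLow; infer_instance
def pvWitness_SecondGreatLow : List Int := ([1, 2, 3] : List Int)

def Spec_SecondGreatLow (arr : List Int) (out : String) : Prop := out = SecondGreatLow_alt arr
instance (arr : List Int) (out : String) : Decidable (Spec_SecondGreatLow arr out) := by unfold Spec_SecondGreatLow; infer_instance

-- ===== CLAIM (what is proved, stated in full; the proofs are below) =====
def Claim_equal_SecondGreatLow : Prop := ∀ (arr : List Int), Dom_SecondGreatLow arr → Pre_SecondGreatLow arr → Spec_SecondGreatLow arr (SecondGreatLow arr)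

-- ===== LEMMAS AND PROOFS =====

-- a value that is a member and a lower bound IS min?, by antisymmetry
theorem pv_min?_eq {xs : List Int} {m : Int} (hmem : m ∈ xs)
    (hlb : ∀ y ∈ xs, m ≤ y) : PySem.List.min? xs (fun x => x) = some m := by
  cases h : PySem.List.min? xs (fun x => x) with
  | none =>
    rcases (PySem.List.min?_eq_none_iff _ _).mp h with rfl
    cases hmem
  | some m' =>
    have h1 := PySem.List.min?_isMin h m hmem
    have h2 := hlb m' (PySem.List.min?_mem h)
    have : m' = m := le_antisymm h1 h2
    simp [this]

theorem pv_max?_eq {xs : List Int} {m : Int} (hmem : m ∈ xs)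
    (hub : ∀ y ∈ xs, y ≤ m) : PySem.List.max? xs (fun x => x) = some m := by
  cases h : PySem.List.max? xs (fun x => x) with
  | none =>
    rcases (PySem.List.max?_eq_none_iff _ _).mp h with rfl
    cases hmem
  | some m' =>
    have h1 := PySem.List.max?_isMax h m hmem
    have h2 := hub m' (PySem.List.max?_mem h)
    have : m' = m := le_antisymm h2 h1
    simp [this]

-- ===== VERDICT (by name: the statement is the Claim_ definition above) =====
theorem SecondGreatLow_spec : Claim_equal_SecondGreatLow := by
  intro arr _ hpre
  unfold Spec_SecondGreatLow SecondGreatLow SecondGreatLow_alt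
  by_cases h2 : arr.length = 2
  · simp only [h2, if_true]
    cases PySem.List.max? arr (fun x => x) <;> cases PySem.List.min? arr (fun x => x) <;>
      simp [pvFmt2]
  · simp only [h2, if_false]
    have h3 : 3 ≤ (PySem.List.dedup arr).length := by
      rcases hpre with h | h
      · exact absurd h h2
      · exact h
    set u := PySem.List.sorted (PySem.Set.ofList arr) (fun x => x) with hu
    have hlenu : u.length = (PySem.List.dedup arr).length := by simp [hu]
    have hL : 3 ≤ u.length := by omega
    have hchain : u.Pairwise (· < ·) := PySem.List.sorted_ofList_pairwise_lt arr
    have hpg := List.pairwise_iff_getElem.mp hchain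
    have humem : ∀ x : Int, x ∈ u ↔ x ∈ arr := fun x => by
      rw [hu, PySem.List.mem_sorted, PySem.Set.mem_ofList]
    have h0mem : u[0]'(by omega) ∈ arr := (humem _).mp (List.getElem_mem _)
    have hLmem : u[u.length-1]'(by omega) ∈ arr := (humem _).mp (List.getElem_mem _)
    have harrne : arr ≠ [] := List.ne_nil_of_mem h0mem
    obtain ⟨mx, hmx⟩ : ∃ mx, PySem.List.max? arr (fun x => x) = some mx := by
      cases h : PySem.List.max? arr (fun x => x)
      · exact absurd ((PySem.List.max?_eq_none_iff _ _).mp h) harrne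
      · exact ⟨_, rfl⟩
    obtain ⟨mn, hmn⟩ : ∃ mn, PySem.List.min? arr (fun x => x) = some mn := by
      cases h : PySem.List.min? arr (fun x => x)
      · exact absurd ((PySem.List.min?_eq_none_iff _ _).mp h) harrne
      · exact ⟨_, rfl⟩
    have hmn0 : mn = u[0]'(by omega) := by
      obtain ⟨j, hj, hje⟩ := List.getElem_of_mem ((humem mn).mpr (PySem.List.min?_mem hmn))
      refine le_antisymm (PySem.List.min?_isMin hmn _ h0mem) ?_
      rcases Nat.eq_zero_or_pos j with rfl | hjpos
      · exact le_of_eq hje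
      · exact le_of_lt (hje ▸ hpg 0 j (by omega) hj hjpos)
    have hmxL : mx = u[u.length-1]'(by omega) := by
      obtain ⟨j, hj, hje⟩ := List.getElem_of_mem ((humem mx).mpr (PySem.List.max?_mem hmx))
      refine le_antisymm ?_ (PySem.List.max?_isMax hmx _ hLmem)
      rcases Nat.lt_or_ge j (u.length - 1) with hjlt | hjge
      · exact le_of_lt (hje ▸ hpg j (u.length - 1) hj (by omega) hjlt)
      · have : j = u.length - 1 := by omega
        subst this; exact le_of_eq hje.symm
    have hnewmem : ∀ x : Int,
        x ∈ arr.filter (fun i => i != mx && i != mn) ↔ x ∈ arr ∧ x ≠ mx ∧ x ≠ mn := by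
      intro x; simp [List.mem_filter]
    have hu1 : u[1]'(by omega) ∈ arr.filter (fun i => i != mx && i != mn) := by
      refine (hnewmem _).mpr ⟨(humem _).mp (List.getElem_mem _), ?_, ?_⟩
      · rw [hmxL]; exact ne_of_lt (hpg 1 (u.length - 1) (by omega) (by omega) (by omega))
      · rw [hmn0]; exact ne_of_gt (hpg 0 1 (by omega) (by omega) (by omega))
    have hlow : ∀ x ∈ arr.filter (fun i => i != mx && i != mn), u[1]'(by omega) ≤ x := by
      intro x hx
      obtain ⟨hxa, hxmx, hxmn⟩ := (hnewmem x).mp hx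
      obtain ⟨j, hj, hje⟩ := List.getElem_of_mem ((humem x).mpr hxa)
      have hj0 : j ≠ 0 := by
        intro h; exact hxmn (by rw [← hje, hmn0]; simp [h])
      rcases Nat.lt_or_ge 1 j with hjlt | hjge
      · exact le_of_lt (hje ▸ hpg 1 j (by omega) hj hjlt)
      · have : j = 1 := by omega
        subst this; exact le_of_eq hje
    have hu2 : u[u.length-2]'(by omega) ∈ arr.filter (fun i => i != mx && i != mn) := by
      refine (hnewmem _).mpr ⟨(humem _).mp (List.getElem_mem _), ?_, ?_⟩
      · rw [hmxL]; exact ne_of_lt (hpg (u.length - 2) (u.length - 1) (by omega) (by omega) (by omega))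
      · rw [hmn0]; exact ne_of_gt (hpg 0 (u.length - 2) (by omega) (by omega) (by omega))
    have hhigh : ∀ x ∈ arr.filter (fun i => i != mx && i != mn), x ≤ u[u.length-2]'(by omega) := by
      intro x hx
      obtain ⟨hxa, hxmx, hxmn⟩ := (hnewmem x).mp hx
      obtain ⟨j, hj, hje⟩ := List.getElem_of_mem ((humem x).mpr hxa)
      have hjtop : j ≠ u.length - 1 := by
        intro h; exact hxmx (by rw [← hje, hmxL]; simp [h])
      rcases Nat.lt_or_ge j (u.length - 2) with hjlt | hjge
      · exact le_of_lt (hje ▸ hpg j (u.length - 2) hj (by omega) hjlt)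
      · have : j = u.length - 2 := by omega
        subst this; exact le_of_eq hje.symm
    have hminnew := pv_min?_eq hu1 hlow
    have hmaxnew := pv_max?_eq hu2 hhigh
    have hg1 : PySem.List.pyGet? u 1 = some (u[1]'(by omega)) := by
      simp only [PySem.List.pyGet?, PySem.List.pyIdx?, zero_le_one, if_true, Nat.one_lt_cast,
        Int.toNat_one]
      rw [if_pos (by exact_mod_cast by omega)]
      simp [List.getElem?_eq_getElem (by omega : 1 < u.length)]
    have hg2 : PySem.List.pyGet? u (-2) = some (u[u.length-2]'(by omega)) := by
      simp only [PySem.List.pyGet?, PySem.List.pyIdx?]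
      norm_num
      rw [if_pos (by omega)]
      simp [List.getElem?_eq_getElem (by omega : u.length - 2 < u.length)]
    rw [hmx, hmn]
    simp only [hminnew, hmaxnew, hg1, hg2, pvFmt2]
    rw [if_neg (by omega)]
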